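-- pv_equiv track=rewrite | github.com/acasadoalonso/SWiface | parserfuncs.py | gdatar
-- ===== SOURCE A (Python) =====
-- def gdatar (data, typer):               # get data on the  right
--         p=data.find(typer)              # scan for the type requested
--         if p == -1:
--                 return (" ")
--         p=p+len(typer)
--         pb=p
--         max=len(data)-1
--         while (pb < max):
--                 if data[pb] == ' ' or data[pb] == '\n' or data[pb] == '\r':
--                         break
--                 pb += 1
--         ret=data[p:pb]                  # return the data requested
--         return(ret)
-- ===== SOURCE B (Python) =====
-- def gdatar(data, typer):
--     p = data.find(typer)
--     if p == -1:
--         return " "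
--     p += len(typer)
--     cands = [q for q in (data.find(c, p) for c in (' ', '\n', '\r')) if q != -1]
--     end = min(cands, default=len(data))
--     return data[p:end]
-- ===== Notes on version B (the rewrite author's own statement) =====
-- stated objective: idiomatic
-- what changed: A scans the string character by character in a while loop to locate the first whitespace after the marker; B issues one str.find per whitespace character and takes the min of the successful positions (defaulting to the string's end), so no explicit scan loop remains.
-- intended difference: When the marker is found and the rest of the string after it contains no space/newline/CR, A's loop never inspects the final character and returns the token with its last character silently dropped; B returns the full token, which is the intended value. — e.g. on gdatar("x=ab", "x="): A returns "a", B returns "ab"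
import Mathlib
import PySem

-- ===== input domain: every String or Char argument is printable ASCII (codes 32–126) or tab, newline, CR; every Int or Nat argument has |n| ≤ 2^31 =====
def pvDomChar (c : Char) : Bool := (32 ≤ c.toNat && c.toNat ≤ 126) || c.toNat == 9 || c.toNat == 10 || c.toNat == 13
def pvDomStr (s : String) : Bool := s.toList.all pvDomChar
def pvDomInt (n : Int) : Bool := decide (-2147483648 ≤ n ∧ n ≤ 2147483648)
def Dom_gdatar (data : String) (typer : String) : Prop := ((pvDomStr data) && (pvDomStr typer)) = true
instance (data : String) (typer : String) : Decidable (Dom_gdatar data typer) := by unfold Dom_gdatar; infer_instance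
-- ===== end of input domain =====

-- B replaces A's char-by-char while loop with one str.find per whitespace character plus min;
-- objective: idiomatic (same asymptotic cost). On D_ below A drops the token's last character; B returns the full token.

-- ===== PORT A =====
-- A's while loop: advance pb while pb < mx, break on ' '/'\n'/'\r'.
-- getD is safe: the guard gives pb < mx < cs.length whenever the element is read.
def gdatarScan (cs : List Char) (mx : Nat) (pb : Nat) : Nat :=
  if pb < mx then
    if cs.getD pb ' ' == ' ' || cs.getD pb ' ' == '\n' || cs.getD pb ' ' == '\r' then pb
    else gdatarScan cs mx (pb + 1)
  else pb
termination_by mx - pb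

-- Python's max = len(data)-1 can be -1 (empty data); then p = 0 and the guard is false
-- under both Int and Nat readings, so Nat subtraction is exact here.
def gdatar (data : String) (typer : String) : String :=
  let p := PySem.Str.find data typer
  if p = -1 then " "
  else
    let p := p.toNat + typer.toList.length
    let mx := data.toList.length - 1
    let pb := gdatarScan data.toList mx p
    String.mk (PySem.List.slice data.toList (some (p : Int)) (some (pb : Int)))

-- ===== PORT B =====
def gdatar_alt (data : String) (typer : String) : String :=
  let p := PySem.Str.find data typer
  if p = -1 then " "
  else
    let p := p.toNat + typer.toList.length
    let cands := ([" ", "\n", "\r"].map (fun c => PySem.Str.findFrom data c (p : Int))).filter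
        (fun q => decide (q ≠ -1))
    let endP := PySem.List.minD cands (fun x => x) (data.toList.length : Int)
    String.mk (PySem.List.slice data.toList (some (p : Int)) (some endP))

-- ===== PRECONDITION & SPEC =====
-- When the marker is found and the rest of the string after it contains no space/newline/CR,
-- A's loop never inspects the final character and returns the token with its last character
-- silently dropped; B returns the full token, which is the intended value.
def D_gdatar (data : String) (typer : String) : Prop :=
  PySem.Str.find data typer ≠ -1 ∧
  (PySem.Str.find data typer).toNat + typer.length < data.length ∧
  (data.toList.drop ((PySem.Str.find data typer).toNat + typer.length)).all
    (fun c => !(c == ' ' || c == '\n' || c == '\r'))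
instance (data : String) (typer : String) : Decidable (D_gdatar data typer) := by
  unfold D_gdatar; infer_instance

def Spec_gdatar (data : String) (typer : String) (out : String) : Prop :=
  ¬ D_gdatar data typer → out = gdatar_alt data typer
instance (data : String) (typer : String) (out : String) : Decidable (Spec_gdatar data typer out) := by
  unfold Spec_gdatar; infer_instance

def pvDiffWitness_gdatar : String × String := ("x=ab", "x=")
def pvDiffWitnessOut_gdatar : String × String := ("a", "ab")

-- ===== CLAIM (what is proved, stated in full; the proofs are below) =====
def Claim_unchanged_gdatar : Prop :=
  ∀ (data : String) (typer : String), Dom_gdatar data typer → Spec_gdatar data typer (gdatar data typer)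
def Claim_changed_gdatar : Prop :=
  Dom_gdatar (pvDiffWitness_gdatar.1) (pvDiffWitness_gdatar.2) ∧
  D_gdatar (pvDiffWitness_gdatar.1) (pvDiffWitness_gdatar.2) ∧
  gdatar (pvDiffWitness_gdatar.1) (pvDiffWitness_gdatar.2) = pvDiffWitnessOut_gdatar.1 ∧
  gdatar_alt (pvDiffWitness_gdatar.1) (pvDiffWitness_gdatar.2) = pvDiffWitnessOut_gdatar.2 ∧
  pvDiffWitnessOut_gdatar.1 ≠ pvDiffWitnessOut_gdatar.2
def Claim_exact_gdatar : Prop :=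
  ∀ (data : String) (typer : String), Dom_gdatar data typer → D_gdatar data typer →
    gdatar data typer ≠ gdatar_alt data typer

-- ===== LEMMAS AND PROOFS =====

-- (String.mk l).toList = l, stated so rw can use it on String.mk terms.
theorem pvToListMk (l : List Char) : (String.mk l).toList = l := String.toList_ofList

-- String.length is the length of toList (bridge for D_gdatar's statement).
theorem pvLenToList (s : String) : s.length = s.toList.length := by simp

-- findIdx of a 3-way disjunction is the min of the three findIdx's.
theorem pvFindIdx_or3 (p q r : Char → Bool) (ys : List Char) :
    ys.findIdx (fun a => p a || q a || r a)
      = min (ys.findIdx p) (min (ys.findIdx q) (ys.findIdx r)) := by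
  induction ys with
  | nil => rfl
  | cons a t ih =>
    simp only [List.findIdx_cons]
    cases hp : p a <;> cases hq : q a <;> cases hr : r a <;>
      simp [hp, hq, hr, ih, Nat.min_def] <;> split_ifs <;> omega

-- PySem.Chars.find for a single-character needle is findIdx (or -1 when absent).
theorem pvFind_singleton (ys : List Char) (c : Char) :
    PySem.Chars.find ys [c]
      = if ys.findIdx (· == c) = ys.length then (-1 : Int) else (ys.findIdx (· == c) : Int) := by
  by_cases hmem : c ∈ ys
  · have hlt : ys.findIdx (· == c) < ys.length :=
      List.findIdx_lt_length.mpr ⟨c, hmem, by simp⟩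
    rw [if_neg (by omega)]
    have h0 : 0 ≤ PySem.Chars.find ys [c] := by
      rw [PySem.Chars.find_nonneg_iff]
      obtain ⟨s, t, rfl⟩ := List.append_of_mem hmem
      exact ⟨s, t, by simp⟩
    obtain ⟨hpre, hmin⟩ := PySem.Chars.find_spec h0
    set k := (PySem.Chars.find ys [c]).toNat with hk
    have hklen : k < ys.length := by
      by_contra hge
      rw [List.drop_eq_nil_of_le (by omega)] at hpre
      simp at hpre
    have hdrop : ys.drop k = ys[k] :: ys.drop (k + 1) := List.drop_eq_getElem_cons hklen
    have hck : ys[k] = c := by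
      rw [hdrop] at hpre
      obtain ⟨t, ht⟩ := hpre
      simp only [List.cons_append, List.nil_append, List.cons.injEq] at ht
      exact ht.1.symm
    have hfi : ys.findIdx (· == c) = k := by
      rw [List.findIdx_eq hklen]
      refine ⟨by simp [hck], fun j hj => ?_⟩
      by_contra hne
      simp only [Bool.not_eq_false, beq_iff_eq] at hne
      refine hmin j hj ⟨ys.drop (j + 1), ?_⟩
      show [c] ++ ys.drop (j + 1) = ys.drop j
      rw [List.drop_eq_getElem_cons (show j < ys.length by omega)]
      simp [hne]
    rw [hfi, hk]
    omega
  · rw [if_pos (List.findIdx_eq_length.mpr (fun x hx => by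
      simp only [beq_eq_false_iff_ne, ne_eq]
      rintro rfl; exact hmem hx))]
    rw [PySem.Chars.find_eq_neg_one_iff]
    intro hinf
    exact hmem (hinf.sublist.subset (List.mem_singleton_self c))

-- Characterisation of A's scan loop.
theorem pvScan_eq (cs : List Char) (mx pb : Nat) (hmx : mx ≤ cs.length) :
    gdatarScan cs mx pb
      = pb + min ((cs.drop pb).findIdx
          (fun a => a == ' ' || a == '\n' || a == '\r')) (mx - pb) := by
  fun_induction gdatarScan cs mx pb with
  | case1 pb hlt hws =>
    have hpb : pb < cs.length := by omega
    rw [List.getD_eq_getElem cs ' ' hpb] at hws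
    have h0 : List.findIdx (fun a => a == ' ' || a == '\n' || a == '\r') (List.drop pb cs) = 0 := by
      rw [List.drop_eq_getElem_cons hpb, List.findIdx_cons, hws]; rfl
    simp [h0]
  | case2 pb hlt hws ih =>
    have hpb : pb < cs.length := by omega
    rw [List.drop_eq_getElem_cons hpb]
    rw [List.getD_eq_getElem cs ' ' hpb] at hws
    simp only [Bool.not_eq_true] at hws
    rw [List.findIdx_cons, hws]
    simp only [cond_false, ih]
    simp only [Nat.min_def]
    split_ifs <;> omega
  | case3 pb hge =>
    have : mx - pb = 0 := by omega
    simp [this]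

-- PySem.List.minD evaluated on short literal lists (Python's min with default).
theorem pvMinD0 (d : Int) : PySem.List.minD ([] : List Int) (fun x => x) d = d := rfl
theorem pvMinD1 (a d : Int) : PySem.List.minD [a] (fun x => x) d = a := rfl
theorem pvMinD2 (a b d : Int) : PySem.List.minD [a, b] (fun x => x) d
    = if b < a then b else a := by
  simp only [PySem.List.minD, PySem.List.min?, List.foldl_cons, List.foldl_nil]
  split_ifs <;> rfl
theorem pvMinD3 (a b c d : Int) : PySem.List.minD [a, b, c] (fun x => x) d
    = if c < (if b < a then b else a) then c else (if b < a then b else a) := by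
  simp only [PySem.List.minD, PySem.List.min?, List.foldl_cons, List.foldl_nil]
  split_ifs <;> simp_all <;> rw [if_neg (by omega)] <;> rfl

-- The filter predicate of B, evaluated on one (already rewritten) candidate.
theorem pvKeep (L p fi : Nat) (hpL : p ≤ L) :
    (decide ((if fi = L - p then (-1 : Int) else (p : Int) + (fi : Int)) ≠ -1))
      = decide (fi ≠ L - p) := by
  rw [decide_eq_decide]
  split_ifs with hf <;> omega

-- Shared head of both unchanged-case proofs: with find ≠ -1, both outputs as slices.
theorem pvSliceEmpty (cs : List Char) (p : Nat) (hpL : cs.length ≤ p) (b : Int) :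
    PySem.List.slice cs (some (p : Int)) (some b) = [] := by
  apply List.eq_nil_of_length_eq_zero
  rw [PySem.List.length_slice]
  have h1 : PySem.List.clampIdx cs.length b ≤ cs.length := PySem.List.clampIdx_le cs.length b
  have h2 : PySem.List.clampIdx cs.length (p : Int) = cs.length := by
    rw [PySem.List.clampIdx_natCast]
    exact min_eq_right (by omega)
  rw [h2]
  omega

-- ===== VERDICT (by name: the statements are the Claim_ definitions above) =====
set_option maxHeartbeats 4000000 in
theorem gdatar_spec : Claim_unchanged_gdatar := by
  intro data typer _
  unfold Spec_gdatar
  intro hnd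
  unfold gdatar gdatar_alt
  by_cases h : PySem.Str.find data typer = -1
  · simp only [PySem.Str.find_eq] at h
    simp [h]
  · simp only [PySem.Str.find_eq] at h
    simp only [PySem.Str.find_eq, PySem.Str.findFrom_eq, if_neg h]
    set cs := data.toList with hcs
    set ts := typer.toList with hts
    set p := (PySem.Chars.find cs ts).toNat + ts.length with hpdef
    set L := cs.length with hLdef
    have h0 : 0 ≤ PySem.Chars.find cs ts := by
      have := PySem.Chars.neg_one_le_find cs ts; omega
    have hpre := (PySem.Chars.find_spec h0).1
    have hkL : PySem.Chars.find cs ts ≤ (L : Int) := PySem.Chars.find_le_length cs ts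
    have hp : p ≤ L := by
      have h1 := hpre.length_le
      rw [List.length_drop] at h1
      omega
    -- ¬D plus find ≠ -1 gives: p = L, or some whitespace character lies in cs.drop p
    have hws : p = L ∨ ∃ c ∈ cs.drop p, (c == ' ' || c == '\n' || c == '\r') = true := by
      unfold D_gdatar at hnd
      simp only [PySem.Str.find_eq, pvLenToList] at hnd
      rw [← hcs, ← hts, ← hpdef, ← hLdef] at hnd
      rcases Nat.lt_or_ge p L with hpL | hpL
      · right
        by_contra hno
        push_neg at hno
        refine hnd ⟨h, hpL, ?_⟩
        rw [List.all_eq_true]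
        intro c hc
        simpa using hno c hc
      · left; omega
    have t1 : (" " : String).toList = [' '] := rfl
    have t2 : ("\n" : String).toList = ['\n'] := rfl
    have t3 : ("\r" : String).toList = ['\r'] := rfl
    have hfr : ∀ ch : Char, PySem.Chars.findFrom cs [ch] (p : Int)
        = if (cs.drop p).findIdx (· == ch) = L - p then (-1 : Int)
          else (p : Int) + ((cs.drop p).findIdx (· == ch) : Int) := by
      intro ch
      rw [PySem.Chars.findFrom_natCast cs [ch] p hp, pvFind_singleton, List.length_drop]
      split_ifs <;> first | rfl | omega | contradiction
    clear_value p L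
    simp only [List.map_cons, List.map_nil, t1, t2, t3, hfr]
    rcases hws with hpL | ⟨c, hcmem, hcws⟩
    · -- p = L: both slices are empty
      rw [pvSliceEmpty cs p (by omega), pvSliceEmpty cs p (by omega)]
    · -- a whitespace character occurs after p: both ends are p + F
      have hpL : p < L := by
        by_contra hge
        rw [List.drop_eq_nil_of_le (by omega)] at hcmem
        simp at hcmem
      have hF : (cs.drop p).findIdx (fun a => a == ' ' || a == '\n' || a == '\r') < L - p := by
        have := List.findIdx_lt_length (p := fun a => a == ' ' || a == '\n' || a == '\r')
          (xs := cs.drop p) |>.mpr ⟨c, hcmem, hcws⟩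
        rw [List.length_drop] at this
        omega
      refine congrArg String.mk
        (congrArg (fun b : Int => PySem.List.slice cs (some (p : Int)) (some b)) ?_)
      rw [pvScan_eq cs (L - 1) p (by omega)]
      rw [pvFindIdx_or3] at hF ⊢
      set f1 := (cs.drop p).findIdx (fun a => a == ' ') with hf1
      set f2 := (cs.drop p).findIdx (fun a => a == '\n') with hf2
      set f3 := (cs.drop p).findIdx (fun a => a == '\r') with hf3
      clear_value f1 f2 f3
      have hb1 : f1 ≤ L - p := by
        have := @List.findIdx_le_length _ (fun a => a == ' ') (cs.drop p)
        rw [List.length_drop] at this; omega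
      have hb2 : f2 ≤ L - p := by
        have := @List.findIdx_le_length _ (fun a => a == '\n') (cs.drop p)
        rw [List.length_drop] at this; omega
      have hb3 : f3 ≤ L - p := by
        have := @List.findIdx_le_length _ (fun a => a == '\r') (cs.drop p)
        rw [List.length_drop] at this; omega
      simp only [List.filter_cons, List.filter_nil,
        pvKeep L p f1 hp, pvKeep L p f2 hp, pvKeep L p f3 hp]
      by_cases c1 : f1 = L - p <;> by_cases c2 : f2 = L - p <;>
        by_cases c3 : f3 = L - p <;>
        simp only [c1, c2, c3, ne_eq, decide_not, decide_true, decide_false,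
          Bool.not_true, Bool.not_false, eq_self_iff_true, if_true, if_false,
          Bool.false_eq_true, iff_true, iff_false, not_true, not_false_iff] <;>
        (first | rw [pvMinD3] | rw [pvMinD2] | rw [pvMinD1] | rw [pvMinD0]) <;>
        simp only [Nat.min_def] <;>
        split_ifs <;> omega

set_option maxHeartbeats 4000000 in
set_option maxRecDepth 10000 in
theorem gdatar_changed : Claim_changed_gdatar := by
  unfold Claim_changed_gdatar
  -- gdatarScan is well-founded recursion, so its value is computed by simp, the rest by decide
  refine ⟨by decide, by decide, ?_, ?_, by decide⟩
  · show gdatar "x=ab" "x=" = "a"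
    simp only [gdatar, PySem.Str.find_eq]
    norm_num [show PySem.Chars.find "x=ab".toList "x=".toList = 0 from by decide]
    rw [show ("x=ab" : String).length = 4 from by decide,
        show ("x=" : String).length = 2 from by decide]
    norm_num
    rw [show gdatarScan "x=ab".toList 3 2 = 3 from by simp [gdatarScan]]
    decide
  · show gdatar_alt "x=ab" "x=" = "ab"
    decide

set_option maxHeartbeats 4000000 in
theorem gdatar_tight : Claim_exact_gdatar := by
  intro data typer _ hd
  unfold D_gdatar at hd
  simp only [PySem.Str.find_eq, pvLenToList] at hd
  obtain ⟨hne, hpL, hnows⟩ := hd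
  rw [List.all_eq_true] at hnows
  unfold gdatar gdatar_alt
  simp only [PySem.Str.find_eq, PySem.Str.findFrom_eq, if_neg hne]
  set cs := data.toList with hcs
  set ts := typer.toList with hts
  set p := (PySem.Chars.find cs ts).toNat + ts.length with hpdef
  set L := cs.length with hLdef
  -- no whitespace after p: every findIdx on cs.drop p equals its length L - p
  have hall : ∀ ch : Char, (ch = ' ' ∨ ch = '\n' ∨ ch = '\r') →
      (cs.drop p).findIdx (· == ch) = L - p := by
    intro ch hch
    rw [show L - p = (cs.drop p).length by rw [List.length_drop]]
    apply List.findIdx_eq_length.mpr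
    intro x hx
    have hx2 := hnows x hx
    rcases hch with rfl | rfl | rfl <;> simp_all
  have hp : p ≤ L := by omega
  have t1 : (" " : String).toList = [' '] := rfl
  have t2 : ("\n" : String).toList = ['\n'] := rfl
  have t3 : ("\r" : String).toList = ['\r'] := rfl
  have hfr : ∀ ch : Char, (ch = ' ' ∨ ch = '\n' ∨ ch = '\r') →
      PySem.Chars.findFrom cs [ch] (p : Int) = -1 := by
    intro ch hch
    rw [PySem.Chars.findFrom_natCast cs [ch] p hp, pvFind_singleton, List.length_drop,
      hall ch hch]
    have hLL : L - p = cs.length - p := by rw [hLdef]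
    simp [hLL]
  -- the three findIdx's all miss, so A's scan runs to L-1 while B's end is L
  have hFidx : (cs.drop p).findIdx (fun a => a == ' ' || a == '\n' || a == '\r') = L - p := by
    rw [pvFindIdx_or3, hall ' ' (Or.inl rfl), hall '\n' (Or.inr (Or.inl rfl)),
      hall '\r' (Or.inr (Or.inr rfl))]
    simp
  have hA : gdatarScan cs (L - 1) p = L - 1 := by
    rw [pvScan_eq cs (L - 1) p (by omega), hFidx, Nat.min_def]
    split_ifs <;> omega
  intro heq
  have hlen := congrArg String.toList heq
  rw [pvToListMk, pvToListMk] at hlen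
  have hlen2 := congrArg List.length hlen
  rw [PySem.List.length_slice, PySem.List.length_slice] at hlen2
  simp only [List.map_cons, List.map_nil, t1, t2, t3,
    hfr ' ' (Or.inl rfl), hfr '\n' (Or.inr (Or.inl rfl)), hfr '\r' (Or.inr (Or.inr rfl)),
    hA, List.filter_cons, List.filter_nil] at hlen2
  norm_num at hlen2
  omega
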